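-- pv_equiv track=rewrite | github.com/krobertslab/quehry-lf2fhir | src/data/logical_forms_to_fhir_queries.py | construct_semtype_resource_mapping
-- ===== SOURCE A (Python) =====
-- def construct_semtype_resource_mapping(set_semantic_types):
--     dict_object_types = {}
--     for st in set_semantic_types:
--         if 'Function' in st or 'Abnormality' in st or st == 'Qualitative Concept':
--             dict_object_types[st] = 'Condition/Observation/AllergyIntolerance/Procedure'
--         elif 'Disease' in st or 'Syndrome' in st or 'Symptom' in st or 'Injury' in st or 'Virus' in st:
--             dict_object_types[st] = 'Condition/AllergyIntolerance/CarePlan'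
--         elif 'Finding' in st or 'Dysfunction' in st:
--             dict_object_types[st] = 'Observation/Condition/AllergyIntolerance/Procedure/Encounter'
--         elif 'Body Location' in st or 'Body Part' in st or st == 'Laboratory or Test Result':
--             dict_object_types[st] = 'Observation'
--         elif 'Substance' in st or st == 'Inorganic Chemical' or st == 'Organic Chemical':
--             dict_object_types[st] = 'MedicationAdministration/MedicationStatement/Observation'
--         elif st == 'Amino Acid, Peptide, or Protein':
--             dict_object_types[st] = 'MedicationAdministration/MedicationStatement/MedicationOrder/Observation/Procedure'
--         elif 'Professional' in st:
--             dict_object_types[st] = 'Encounter'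
--         elif st == 'Drug Delivery Device':
--             dict_object_types[st] = 'MedicationOrder'
--         elif 'Device' in st or st == 'Manufactured Object':
--             dict_object_types[st] = 'Procedure'
--         elif 'Procedure' in st:
--             dict_object_types[st] = 'MedicationAdministration/MedicationStatement/Procedure/CarePlan/Encounter'
--         elif 'Material' in st or st == 'Antibiotic' or st == 'Food':
--             dict_object_types[st] = 'MedicationAdministration/MedicationStatement'
--         elif 'Activity' in st:
--             dict_object_types[st] = 'Procedure/Observation/Condition/AllergyIntolerance/CarePlan/Encounter'
--         elif 'Attribute' in st or st == 'Organism':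
--             dict_object_types[st] = 'Observation/Procedure/DiagnosticReport'
--         elif st == 'Temporal Concept':
--             dict_object_types[st] = 'Observation'
--         elif st == 'Immunologic Factor':
--             dict_object_types[st] = 'Immunization'
--         elif st == 'Clinical Drug':
--             dict_object_types[st] = 'MedicationOrder/Immunization'
--         elif st == 'Intellectual Product':
--             dict_object_types[st] = 'CarePlan/Observation'
--         else:
--             # If the semantic type is none of the above, fetch everything
--             dict_object_types[st] = \
--                 'Observation/Condition/Procedure/MedicationAdministration/MedicationStatement/MedicationOrder/' \
--                 'Immunization/CarePlan/AllergyIntolerance/DiagnosticReport/Encounter'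
--
--     # Add a default mapping for null values
--     dict_object_types[None] = ''
--
--     return dict_object_types
-- ===== SOURCE B (Python) =====
-- _DEFAULT = ('Observation/Condition/Procedure/MedicationAdministration/MedicationStatement/MedicationOrder/'
--             'Immunization/CarePlan/AllergyIntolerance/DiagnosticReport/Encounter')
--
-- # Each rule: (substrings, exact strings, resource), in A's priority order.
-- _RULES = [
--     (['Function', 'Abnormality'], ['Qualitative Concept'],
--      'Condition/Observation/AllergyIntolerance/Procedure'),
--     (['Disease', 'Syndrome', 'Symptom', 'Injury', 'Virus'], [],
--      'Condition/AllergyIntolerance/CarePlan'),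
--     (['Finding', 'Dysfunction'], [],
--      'Observation/Condition/AllergyIntolerance/Procedure/Encounter'),
--     (['Body Location', 'Body Part'], ['Laboratory or Test Result'], 'Observation'),
--     (['Substance'], ['Inorganic Chemical', 'Organic Chemical'],
--      'MedicationAdministration/MedicationStatement/Observation'),
--     ([], ['Amino Acid, Peptide, or Protein'],
--      'MedicationAdministration/MedicationStatement/MedicationOrder/Observation/Procedure'),
--     (['Professional'], [], 'Encounter'),
--     ([], ['Drug Delivery Device'], 'MedicationOrder'),
--     (['Device'], ['Manufactured Object'], 'Procedure'),
--     (['Procedure'], [],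
--      'MedicationAdministration/MedicationStatement/Procedure/CarePlan/Encounter'),
--     (['Material'], ['Antibiotic', 'Food'], 'MedicationAdministration/MedicationStatement'),
--     (['Activity'], [],
--      'Procedure/Observation/Condition/AllergyIntolerance/CarePlan/Encounter'),
--     (['Attribute'], ['Organism'], 'Observation/Procedure/DiagnosticReport'),
--     ([], ['Temporal Concept'], 'Observation'),
--     ([], ['Immunologic Factor'], 'Immunization'),
--     ([], ['Clinical Drug'], 'MedicationOrder/Immunization'),
--     ([], ['Intellectual Product'], 'CarePlan/Observation'),
-- ]
--
--
-- def construct_semtype_resource_mapping(set_semantic_types):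
--     # Deduplicated keys (first occurrence order, = the dict's key order) and a
--     # parallel value array, initially all default.  Then sweep the rules in
--     # REVERSE priority order, overwriting the value of every key the rule
--     # matches: the last overwrite is the highest-priority matching rule, so
--     # each key ends with its first matching rule's resource (default if none).
--     keys = list(dict.fromkeys(set_semantic_types))
--     vals = [_DEFAULT] * len(keys)
--     for subs, exacts, res in reversed(_RULES):
--         vals = [res if (any(p in st for p in subs) or st in exacts) else v
--                 for st, v in zip(keys, vals)]
--     d = dict(zip(keys, vals))
--     d[None] = ''
--     return d
-- ===== Notes on version B (the rewrite author's own statement) =====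
-- stated objective: alternative
-- what changed: Instead of scanning the rule cascade per element, B dedups the keys once, keeps a parallel value array initialized to the default, and sweeps the rule table in reverse priority order, each rule overwriting the values of all keys it matches, so the last (highest-priority) overwrite wins; the dict is assembled from zip(keys, vals) at the end.
import Mathlib
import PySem

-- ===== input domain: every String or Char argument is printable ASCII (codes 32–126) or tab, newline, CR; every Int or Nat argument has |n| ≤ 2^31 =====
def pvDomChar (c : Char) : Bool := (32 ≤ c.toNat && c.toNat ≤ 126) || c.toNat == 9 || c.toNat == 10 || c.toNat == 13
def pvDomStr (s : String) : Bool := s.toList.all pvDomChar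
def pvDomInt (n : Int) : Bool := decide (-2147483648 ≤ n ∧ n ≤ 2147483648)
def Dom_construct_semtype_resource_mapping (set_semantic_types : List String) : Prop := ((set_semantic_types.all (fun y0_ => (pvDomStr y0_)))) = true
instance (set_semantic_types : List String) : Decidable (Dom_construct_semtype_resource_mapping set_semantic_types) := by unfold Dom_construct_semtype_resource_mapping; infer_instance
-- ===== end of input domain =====

-- B dedups the keys once, keeps a parallel value array initialized to the default, and sweeps
-- a data rule table in REVERSE priority order, each rule overwriting the values of all keys it
-- matches (last overwrite = highest-priority rule), instead of A's per-element if/elif cascade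
-- (alternative decomposition, same cost).

-- ===== PORT A =====
def construct_semtype_resource_mapping (set_semantic_types : List String) : List (Option String × String) :=
  let d := set_semantic_types.foldl (fun d st =>
    if PySem.Str.isIn "Function" st || PySem.Str.isIn "Abnormality" st || st == "Qualitative Concept" then
      d.insert (some st) "Condition/Observation/AllergyIntolerance/Procedure"
    else if PySem.Str.isIn "Disease" st || PySem.Str.isIn "Syndrome" st || PySem.Str.isIn "Symptom" st || PySem.Str.isIn "Injury" st || PySem.Str.isIn "Virus" st then
      d.insert (some st) "Condition/AllergyIntolerance/CarePlan"
    else if PySem.Str.isIn "Finding" st || PySem.Str.isIn "Dysfunction" st then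
      d.insert (some st) "Observation/Condition/AllergyIntolerance/Procedure/Encounter"
    else if PySem.Str.isIn "Body Location" st || PySem.Str.isIn "Body Part" st || st == "Laboratory or Test Result" then
      d.insert (some st) "Observation"
    else if PySem.Str.isIn "Substance" st || st == "Inorganic Chemical" || st == "Organic Chemical" then
      d.insert (some st) "MedicationAdministration/MedicationStatement/Observation"
    else if st == "Amino Acid, Peptide, or Protein" then
      d.insert (some st) "MedicationAdministration/MedicationStatement/MedicationOrder/Observation/Procedure"
    else if PySem.Str.isIn "Professional" st then
      d.insert (some st) "Encounter"
    else if st == "Drug Delivery Device" then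
      d.insert (some st) "MedicationOrder"
    else if PySem.Str.isIn "Device" st || st == "Manufactured Object" then
      d.insert (some st) "Procedure"
    else if PySem.Str.isIn "Procedure" st then
      d.insert (some st) "MedicationAdministration/MedicationStatement/Procedure/CarePlan/Encounter"
    else if PySem.Str.isIn "Material" st || st == "Antibiotic" || st == "Food" then
      d.insert (some st) "MedicationAdministration/MedicationStatement"
    else if PySem.Str.isIn "Activity" st then
      d.insert (some st) "Procedure/Observation/Condition/AllergyIntolerance/CarePlan/Encounter"
    else if PySem.Str.isIn "Attribute" st || st == "Organism" then
      d.insert (some st) "Observation/Procedure/DiagnosticReport"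
    else if st == "Temporal Concept" then
      d.insert (some st) "Observation"
    else if st == "Immunologic Factor" then
      d.insert (some st) "Immunization"
    else if st == "Clinical Drug" then
      d.insert (some st) "MedicationOrder/Immunization"
    else if st == "Intellectual Product" then
      d.insert (some st) "CarePlan/Observation"
    else
      d.insert (some st) "Observation/Condition/Procedure/MedicationAdministration/MedicationStatement/MedicationOrder/Immunization/CarePlan/AllergyIntolerance/DiagnosticReport/Encounter")
    (PySem.Dict.empty)
  (d.insert none "").items

-- ===== PORT B =====
def pvDefault_construct : String :=
  "Observation/Condition/Procedure/MedicationAdministration/MedicationStatement/MedicationOrder/Immunization/CarePlan/AllergyIntolerance/DiagnosticReport/Encounter"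

-- each rule of _RULES: (substrings, exact strings, resource)
def pvRules_construct : List (List String × List String × String) :=
  [ (["Function", "Abnormality"], ["Qualitative Concept"],
     "Condition/Observation/AllergyIntolerance/Procedure"),
    (["Disease", "Syndrome", "Symptom", "Injury", "Virus"], [],
     "Condition/AllergyIntolerance/CarePlan"),
    (["Finding", "Dysfunction"], [],
     "Observation/Condition/AllergyIntolerance/Procedure/Encounter"),
    (["Body Location", "Body Part"], ["Laboratory or Test Result"], "Observation"),
    (["Substance"], ["Inorganic Chemical", "Organic Chemical"],
     "MedicationAdministration/MedicationStatement/Observation"),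
    ([], ["Amino Acid, Peptide, or Protein"],
     "MedicationAdministration/MedicationStatement/MedicationOrder/Observation/Procedure"),
    (["Professional"], [], "Encounter"),
    ([], ["Drug Delivery Device"], "MedicationOrder"),
    (["Device"], ["Manufactured Object"], "Procedure"),
    (["Procedure"], [],
     "MedicationAdministration/MedicationStatement/Procedure/CarePlan/Encounter"),
    (["Material"], ["Antibiotic", "Food"], "MedicationAdministration/MedicationStatement"),
    (["Activity"], [],
     "Procedure/Observation/Condition/AllergyIntolerance/CarePlan/Encounter"),
    (["Attribute"], ["Organism"], "Observation/Procedure/DiagnosticReport"),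
    ([], ["Temporal Concept"], "Observation"),
    ([], ["Immunologic Factor"], "Immunization"),
    ([], ["Clinical Drug"], "MedicationOrder/Immunization"),
    ([], ["Intellectual Product"], "CarePlan/Observation") ]

-- any(p in st for p in subs) or st in exacts
def pvMatch_construct (r : List String × List String × String) (st : String) : Bool :=
  r.1.any (fun p => PySem.Str.isIn p st) || r.2.1.contains st

def construct_semtype_resource_mapping_alt (set_semantic_types : List String) : List (Option String × String) :=
  -- keys = list(dict.fromkeys(set_semantic_types))
  let keys := PySem.List.dedup set_semantic_types
  -- vals = [_DEFAULT] * len(keys)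
  let vals0 := List.replicate keys.length pvDefault_construct
  -- for subs, exacts, res in reversed(_RULES): vals = [res if match else v for st, v in zip(keys, vals)]
  let vals := pvRules_construct.reverse.foldl
    (fun vals r => (keys.zip vals).map (fun p => if pvMatch_construct r p.1 then r.2.2 else p.2)) vals0
  -- d = dict(zip(keys, vals)); d[None] = ''
  let d := (keys.zip vals).foldl (fun d p => d.insert (some p.1) p.2) PySem.Dict.empty
  (d.insert none "").items

-- ===== PRECONDITION & SPEC =====
def Spec_construct_semtype_resource_mapping (set_semantic_types : List String) (out : List (Option String × String)) : Prop := out = construct_semtype_resource_mapping_alt set_semantic_types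
instance (set_semantic_types : List String) (out : List (Option String × String)) : Decidable (Spec_construct_semtype_resource_mapping set_semantic_types out) := by unfold Spec_construct_semtype_resource_mapping; infer_instance

-- ===== CLAIM (what is proved, stated in full; the proofs are below) =====
def Claim_equal_construct_semtype_resource_mapping : Prop := ∀ (set_semantic_types : List String), Dom_construct_semtype_resource_mapping set_semantic_types → Spec_construct_semtype_resource_mapping set_semantic_types (construct_semtype_resource_mapping set_semantic_types)

-- ===== LEMMAS AND PROOFS =====

-- A's cascade, as a value function of the semantic type (proof-only helper).
def pvCascade (st : String) : String :=
  if PySem.Str.isIn "Function" st || PySem.Str.isIn "Abnormality" st || st == "Qualitative Concept" then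
    "Condition/Observation/AllergyIntolerance/Procedure"
  else if PySem.Str.isIn "Disease" st || PySem.Str.isIn "Syndrome" st || PySem.Str.isIn "Symptom" st || PySem.Str.isIn "Injury" st || PySem.Str.isIn "Virus" st then
    "Condition/AllergyIntolerance/CarePlan"
  else if PySem.Str.isIn "Finding" st || PySem.Str.isIn "Dysfunction" st then
    "Observation/Condition/AllergyIntolerance/Procedure/Encounter"
  else if PySem.Str.isIn "Body Location" st || PySem.Str.isIn "Body Part" st || st == "Laboratory or Test Result" then
    "Observation"
  else if PySem.Str.isIn "Substance" st || st == "Inorganic Chemical" || st == "Organic Chemical" then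
    "MedicationAdministration/MedicationStatement/Observation"
  else if st == "Amino Acid, Peptide, or Protein" then
    "MedicationAdministration/MedicationStatement/MedicationOrder/Observation/Procedure"
  else if PySem.Str.isIn "Professional" st then
    "Encounter"
  else if st == "Drug Delivery Device" then
    "MedicationOrder"
  else if PySem.Str.isIn "Device" st || st == "Manufactured Object" then
    "Procedure"
  else if PySem.Str.isIn "Procedure" st then
    "MedicationAdministration/MedicationStatement/Procedure/CarePlan/Encounter"
  else if PySem.Str.isIn "Material" st || st == "Antibiotic" || st == "Food" then
    "MedicationAdministration/MedicationStatement"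
  else if PySem.Str.isIn "Activity" st then
    "Procedure/Observation/Condition/AllergyIntolerance/CarePlan/Encounter"
  else if PySem.Str.isIn "Attribute" st || st == "Organism" then
    "Observation/Procedure/DiagnosticReport"
  else if st == "Temporal Concept" then
    "Observation"
  else if st == "Immunologic Factor" then
    "Immunization"
  else if st == "Clinical Drug" then
    "MedicationOrder/Immunization"
  else if st == "Intellectual Product" then
    "CarePlan/Observation"
  else
    "Observation/Condition/Procedure/MedicationAdministration/MedicationStatement/MedicationOrder/Immunization/CarePlan/AllergyIntolerance/DiagnosticReport/Encounter"

-- first matching rule's resource, else v (proof-only helper characterising B's sweep).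
def pvFMO : List (List String × List String × String) → String → String → String
  | [], _, v => v
  | r :: rest, st, v => if pvMatch_construct r st then r.2.2 else pvFMO rest st v

set_option maxHeartbeats 1000000 in
theorem pvCascade_eq_fmo (st : String) : pvCascade st = pvFMO pvRules_construct st pvDefault_construct := by
  simp only [pvCascade, pvRules_construct, pvFMO, pvMatch_construct, List.any_cons, List.any_nil,
    List.contains_cons, List.elem_nil, Bool.or_false, Bool.false_or, Bool.or_assoc, pvDefault_construct]

theorem pvZipMap_zipWith (f : String → String → String) (c : String → Bool) (r : String)
    (keys : List String) : ∀ vals : List String,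
    ((keys.zip (List.zipWith f keys vals)).map (fun p => if c p.1 then r else p.2))
      = List.zipWith (fun st v => if c st then r else f st v) keys vals := by
  induction keys with
  | nil => intro vals; rfl
  | cons k ks ih =>
      intro vals
      cases vals with
      | nil => rfl
      | cons v vs => simp [ih vs]

theorem pvZipWith_id (keys vals : List String) (h : vals.length = keys.length) :
    List.zipWith (fun _ v => v) keys vals = vals := by
  induction keys generalizing vals with
  | nil => cases vals with | nil => rfl | cons _ _ => simp at h
  | cons k ks ih =>
      cases vals with
      | nil => simp at h
      | cons v vs => simp_all

theorem pvSweep_eq_fmo (R : List (List String × List String × String)) (keys : List String) :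
    ∀ vals : List String, vals.length = keys.length →
    R.reverse.foldl
      (fun vals r => (keys.zip vals).map (fun p => if pvMatch_construct r p.1 then r.2.2 else p.2)) vals
      = List.zipWith (fun st v => pvFMO R st v) keys vals := by
  induction R with
  | nil => intro vals h; simpa [pvFMO] using (pvZipWith_id keys vals h).symm
  | cons r rest ih =>
      intro vals h
      rw [List.reverse_cons, List.foldl_append, ih vals h, List.foldl_cons, List.foldl_nil,
        pvZipMap_zipWith]
      simp only [pvFMO]

theorem pvZipWith_replicate (g : String → String → String) (c : String) (keys : List String) :
    List.zipWith g keys (List.replicate keys.length c) = keys.map (fun st => g st c) := by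
  induction keys with
  | nil => rfl
  | cons k ks ih => simp [List.replicate_succ, ih]

-- the value stored by A's fold for a key that occurs in the list
theorem pvGetD_fold_not_mem (F : String → String) (xs : List String) (st : String)
    (hst : st ∉ xs) : ∀ d : PySem.Dict (Option String) String,
    (xs.foldl (fun d x => d.insert (some x) (F x)) d).getD (some st) "" = d.getD (some st) "" := by
  induction xs with
  | nil => intro d; rfl
  | cons x xs ih =>
      intro d
      simp only [List.mem_cons, not_or] at hst
      rw [List.foldl_cons, ih hst.2, PySem.Dict.getD_insert_of_ne]
      exact fun hEq => hst.1 (Option.some_injective _ hEq)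

theorem pvGetD_fold_mem (F : String → String) (xs : List String) (st : String)
    (hst : st ∈ xs) : ∀ d : PySem.Dict (Option String) String,
    (xs.foldl (fun d x => d.insert (some x) (F x)) d).getD (some st) "" = F st := by
  induction xs with
  | nil => exact absurd hst (List.not_mem_nil)
  | cons x xs ih =>
      intro d
      by_cases hx : st ∈ xs
      · rw [List.foldl_cons, ih hx]
      · have hxst : st = x := by
          rcases List.mem_cons.mp hst with h | h
          · exact h
          · exact absurd h hx
        subst hxst
        rw [List.foldl_cons, pvGetD_fold_not_mem F xs st hx, PySem.Dict.getD_insert_self]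

theorem pvSetAdd_map_some (s : List String) (x : String) :
    PySem.Set.add (s.map some) (some x) = (PySem.Set.add s x).map some := by
  by_cases h : x ∈ s
  · rw [PySem.Set.add_of_mem h, PySem.Set.add_of_mem (by simpa using h)]
  · rw [PySem.Set.add_of_not_mem h, PySem.Set.add_of_not_mem (by simpa using h), List.map_append]
    rfl

theorem pvSetUpdate_map_some (l : List String) : ∀ s : List String,
    PySem.Set.update (s.map some) (l.map some) = (PySem.Set.update s l).map some := by
  induction l with
  | nil => intro s; rfl
  | cons x xs ih =>
      intro s
      rw [List.map_cons, PySem.Set.update_cons, PySem.Set.update_cons, pvSetAdd_map_some, ih]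

theorem pvSetOfList_map_some (l : List String) :
    PySem.Set.ofList (l.map some) = (PySem.Set.ofList l).map some := by
  rw [← PySem.Set.update_nil_left, ← PySem.Set.update_nil_left (xs := l)]
  exact pvSetUpdate_map_some l []

-- the step function of A's port, with the insert pulled out of the branches
theorem pvAStep_eq (d : PySem.Dict (Option String) String) (st : String) :
    (if PySem.Str.isIn "Function" st || PySem.Str.isIn "Abnormality" st || st == "Qualitative Concept" then
      d.insert (some st) "Condition/Observation/AllergyIntolerance/Procedure"
    else if PySem.Str.isIn "Disease" st || PySem.Str.isIn "Syndrome" st || PySem.Str.isIn "Symptom" st || PySem.Str.isIn "Injury" st || PySem.Str.isIn "Virus" st then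
      d.insert (some st) "Condition/AllergyIntolerance/CarePlan"
    else if PySem.Str.isIn "Finding" st || PySem.Str.isIn "Dysfunction" st then
      d.insert (some st) "Observation/Condition/AllergyIntolerance/Procedure/Encounter"
    else if PySem.Str.isIn "Body Location" st || PySem.Str.isIn "Body Part" st || st == "Laboratory or Test Result" then
      d.insert (some st) "Observation"
    else if PySem.Str.isIn "Substance" st || st == "Inorganic Chemical" || st == "Organic Chemical" then
      d.insert (some st) "MedicationAdministration/MedicationStatement/Observation"
    else if st == "Amino Acid, Peptide, or Protein" then
      d.insert (some st) "MedicationAdministration/MedicationStatement/MedicationOrder/Observation/Procedure"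
    else if PySem.Str.isIn "Professional" st then
      d.insert (some st) "Encounter"
    else if st == "Drug Delivery Device" then
      d.insert (some st) "MedicationOrder"
    else if PySem.Str.isIn "Device" st || st == "Manufactured Object" then
      d.insert (some st) "Procedure"
    else if PySem.Str.isIn "Procedure" st then
      d.insert (some st) "MedicationAdministration/MedicationStatement/Procedure/CarePlan/Encounter"
    else if PySem.Str.isIn "Material" st || st == "Antibiotic" || st == "Food" then
      d.insert (some st) "MedicationAdministration/MedicationStatement"
    else if PySem.Str.isIn "Activity" st then
      d.insert (some st) "Procedure/Observation/Condition/AllergyIntolerance/CarePlan/Encounter"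
    else if PySem.Str.isIn "Attribute" st || st == "Organism" then
      d.insert (some st) "Observation/Procedure/DiagnosticReport"
    else if st == "Temporal Concept" then
      d.insert (some st) "Observation"
    else if st == "Immunologic Factor" then
      d.insert (some st) "Immunization"
    else if st == "Clinical Drug" then
      d.insert (some st) "MedicationOrder/Immunization"
    else if st == "Intellectual Product" then
      d.insert (some st) "CarePlan/Observation"
    else
      d.insert (some st) "Observation/Condition/Procedure/MedicationAdministration/MedicationStatement/MedicationOrder/Immunization/CarePlan/AllergyIntolerance/DiagnosticReport/Encounter")
    = d.insert (some st) (pvCascade st) := by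
  unfold pvCascade
  simp only [apply_ite (fun v => PySem.Dict.insert d (some st) v)]

-- items of A's dict-building fold
theorem pvAItems (l : List String) :
    (l.foldl (fun d st => d.insert (some st) (pvCascade st)) PySem.Dict.empty).items
      = (PySem.List.dedup l).map (fun st => (some st, pvCascade st)) := by
  have hnd : (l.foldl (fun d st => d.insert (some st) (pvCascade st)) PySem.Dict.empty).keys.Nodup :=
    PySem.Dict.nodup_keys_foldl_insert_key l some (fun _ st => pvCascade st) _
      PySem.Dict.nodup_keys_empty
  have hkeys : (l.foldl (fun d st => d.insert (some st) (pvCascade st)) PySem.Dict.empty).keys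
      = (PySem.Set.ofList l).map some := by
    rw [PySem.Dict.keys_foldl_insert_key]
    show PySem.Set.update ([] : List (Option String)) (l.map some) = _
    rw [PySem.Set.update_nil_left, pvSetOfList_map_some]
  rw [PySem.Dict.items_eq_map_keys _ hnd "", hkeys, List.map_map, PySem.List.dedup_eq_ofList]
  apply List.map_congr_left
  intro st hst
  have hmem : st ∈ l := (PySem.Set.mem_ofList _ _).mp hst
  simp only [Function.comp]
  rw [pvGetD_fold_mem pvCascade l st hmem]

-- items of B's dict-building fold
theorem pvBItems (keys : List String) (g : String → String) (hnd : keys.Nodup) :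
    ((keys.map (fun k => (k, g k))).foldl (fun d p => d.insert (some p.1) p.2)
        PySem.Dict.empty).items
      = keys.map (fun k => (some k, g k)) := by
  refine (PySem.Dict.items_foldl_insert_fresh (l := keys.map fun k => (k, g k))
      (k := fun p => some p.1) (v := fun p => p.2) (d := PySem.Dict.empty)
      (fun a _ => PySem.Dict.contains_empty _) ?_).trans ?_
  · simp only [List.map_map]
    show (keys.map (fun k => some k)).Nodup
    exact hnd.map (fun _ _ h => Option.some_injective _ h)
  · show PySem.Dict.empty.items ++ _ = _
    simp only [List.map_map]
    rfl

-- a fold-built dict over some-keys does not contain none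
theorem pvNotContainsNone (d : PySem.Dict (Option String) String)
    (h : ∀ k ∈ d.keys, ∃ s, k = some s) : d.contains none = false := by
  rw [PySem.Dict.contains_eq_decide_mem_keys]
  simp only [decide_eq_false_iff_not]
  intro hmem
  obtain ⟨s, hs⟩ := h none hmem
  simp at hs

theorem pvZipSelfMap (g : String → String) (keys : List String) :
    keys.zip (keys.map g) = keys.map (fun k => (k, g k)) := by
  induction keys with
  | nil => rfl
  | cons k ks ih => simp [ih]

-- ===== VERDICT (by name: the statement is the Claim_ definition above) =====
theorem construct_semtype_resource_mapping_spec : Claim_equal_construct_semtype_resource_mapping := by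
  intro l _
  unfold Spec_construct_semtype_resource_mapping construct_semtype_resource_mapping
    construct_semtype_resource_mapping_alt
  simp only []
  -- rewrite A's step function
  have hA : (l.foldl (fun d st =>
      if PySem.Str.isIn "Function" st || PySem.Str.isIn "Abnormality" st || st == "Qualitative Concept" then
        d.insert (some st) "Condition/Observation/AllergyIntolerance/Procedure"
      else if PySem.Str.isIn "Disease" st || PySem.Str.isIn "Syndrome" st || PySem.Str.isIn "Symptom" st || PySem.Str.isIn "Injury" st || PySem.Str.isIn "Virus" st then
        d.insert (some st) "Condition/AllergyIntolerance/CarePlan"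
      else if PySem.Str.isIn "Finding" st || PySem.Str.isIn "Dysfunction" st then
        d.insert (some st) "Observation/Condition/AllergyIntolerance/Procedure/Encounter"
      else if PySem.Str.isIn "Body Location" st || PySem.Str.isIn "Body Part" st || st == "Laboratory or Test Result" then
        d.insert (some st) "Observation"
      else if PySem.Str.isIn "Substance" st || st == "Inorganic Chemical" || st == "Organic Chemical" then
        d.insert (some st) "MedicationAdministration/MedicationStatement/Observation"
      else if st == "Amino Acid, Peptide, or Protein" then
        d.insert (some st) "MedicationAdministration/MedicationStatement/MedicationOrder/Observation/Procedure"
      else if PySem.Str.isIn "Professional" st then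
        d.insert (some st) "Encounter"
      else if st == "Drug Delivery Device" then
        d.insert (some st) "MedicationOrder"
      else if PySem.Str.isIn "Device" st || st == "Manufactured Object" then
        d.insert (some st) "Procedure"
      else if PySem.Str.isIn "Procedure" st then
        d.insert (some st) "MedicationAdministration/MedicationStatement/Procedure/CarePlan/Encounter"
      else if PySem.Str.isIn "Material" st || st == "Antibiotic" || st == "Food" then
        d.insert (some st) "MedicationAdministration/MedicationStatement"
      else if PySem.Str.isIn "Activity" st then
        d.insert (some st) "Procedure/Observation/Condition/AllergyIntolerance/CarePlan/Encounter"
      else if PySem.Str.isIn "Attribute" st || st == "Organism" then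
        d.insert (some st) "Observation/Procedure/DiagnosticReport"
      else if st == "Temporal Concept" then
        d.insert (some st) "Observation"
      else if st == "Immunologic Factor" then
        d.insert (some st) "Immunization"
      else if st == "Clinical Drug" then
        d.insert (some st) "MedicationOrder/Immunization"
      else if st == "Intellectual Product" then
        d.insert (some st) "CarePlan/Observation"
      else
        d.insert (some st) "Observation/Condition/Procedure/MedicationAdministration/MedicationStatement/MedicationOrder/Immunization/CarePlan/AllergyIntolerance/DiagnosticReport/Encounter")
      (PySem.Dict.empty : PySem.Dict (Option String) String))
      = l.foldl (fun d st => d.insert (some st) (pvCascade st)) PySem.Dict.empty := by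
    apply PySem.List.foldl_congr_mem
    intro d st _
    exact pvAStep_eq d st
  rw [hA]
  -- rewrite B's value sweep
  have hlen : (List.replicate (PySem.List.dedup l).length pvDefault_construct).length
      = (PySem.List.dedup l).length := List.length_replicate
  rw [pvSweep_eq_fmo pvRules_construct (PySem.List.dedup l) _ hlen,
    pvZipWith_replicate, pvZipSelfMap]
  have hzip : ((PySem.List.dedup l).map
        (fun k => (k, pvFMO pvRules_construct k pvDefault_construct))) =
      (PySem.List.dedup l).map (fun k => (k, pvCascade k)) := by
    apply List.map_congr_left; intro st _; rw [pvCascade_eq_fmo]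
  rw [hzip]
  -- both sides: insert none "" appends
  have hAit := pvAItems l
  have hAnone : (l.foldl (fun d st => d.insert (some st) (pvCascade st))
      PySem.Dict.empty).contains none = false := by
    apply pvNotContainsNone
    intro k hk
    simp only [PySem.Dict.keys] at hk
    rw [hAit] at hk
    simp only [List.map_map, List.mem_map] at hk
    obtain ⟨st, _, hst⟩ := hk
    exact ⟨st, hst.symm⟩
  have hBnone : (((PySem.List.dedup l).map (fun k => (k, pvCascade k))).foldl
      (fun d p => d.insert (some p.1) p.2) PySem.Dict.empty).contains none = false := by
    apply pvNotContainsNone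
    intro k hk
    simp only [PySem.Dict.keys] at hk
    rw [pvBItems (PySem.List.dedup l) pvCascade (by rw [PySem.List.dedup_eq_ofList]; exact PySem.Set.nodup_ofList l)] at hk
    simp only [List.map_map, List.mem_map] at hk
    obtain ⟨st, _, hst⟩ := hk
    exact ⟨st, hst.symm⟩
  rw [PySem.Dict.items_insert_of_not_contains _ _ hAnone,
    PySem.Dict.items_insert_of_not_contains _ _ hBnone, hAit,
    pvBItems (PySem.List.dedup l) pvCascade (by rw [PySem.List.dedup_eq_ofList]; exact PySem.Set.nodup_ofList l)]
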